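-- pv_equiv track=rewrite | github.com/JaredPap/pcbi | data/augment.py | find_original_index
-- ===== SOURCE A (Python) =====
-- def find_original_index(arr,
--                         a):
--     cumulative_sum = 0
--     for i, count in enumerate(arr):
--
--         previous_sum = cumulative_sum
--         cumulative_sum += count
--
--         if a < cumulative_sum:
--             index_in_subarray = a - previous_sum
--             return i, index_in_subarray
--     return -1, -1
-- ===== SOURCE B (Python) =====
-- def find_original_index(arr, a):
--     if not arr:
--         return -1, -1
--     if a < arr[0]:
--         return 0, a
--     i, offset = find_original_index(arr[1:], a - arr[0])
--     return (i + 1, offset) if i >= 0 else (-1, -1)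
-- ===== Notes on version B (the rewrite author's own statement) =====
-- stated objective: alternative
-- what changed: Replaces A's enumerate loop with running cumulative and previous sums by a structural recursion that rebases the target (a - arr[0]) into the tail and shifts the returned bucket index back up, keeping no accumulator state at all.
import Mathlib
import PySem

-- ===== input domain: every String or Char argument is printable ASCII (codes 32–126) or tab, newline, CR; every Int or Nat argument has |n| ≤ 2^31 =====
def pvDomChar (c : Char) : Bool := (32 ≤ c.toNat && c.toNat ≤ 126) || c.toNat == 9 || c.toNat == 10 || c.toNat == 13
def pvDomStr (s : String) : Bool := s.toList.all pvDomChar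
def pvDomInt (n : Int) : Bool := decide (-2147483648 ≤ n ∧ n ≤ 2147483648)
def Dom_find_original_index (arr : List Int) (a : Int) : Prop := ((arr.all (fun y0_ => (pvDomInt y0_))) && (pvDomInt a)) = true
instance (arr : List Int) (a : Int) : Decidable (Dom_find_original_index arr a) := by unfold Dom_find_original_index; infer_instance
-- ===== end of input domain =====

-- B replaces A's running-sum loop by a structural recursion that rebases the target into the tail; same cost, stateless decomposition.

-- ===== PORT A =====
-- the enumerate loop with running cumulative_sum
def goA (a : Int) : List Int → Int → Int → Int × Int
  | [], _, _ => (-1, -1)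
  | count :: rest, i, cumulative_sum =>
    let previous_sum := cumulative_sum
    let cumulative_sum' := cumulative_sum + count
    if a < cumulative_sum' then (i, a - previous_sum)
    else goA a rest (i + 1) cumulative_sum'

def find_original_index (arr : List Int) (a : Int) : Int × Int :=
  goA a arr 0 0

-- ===== PORT B =====
def find_original_index_alt : List Int → Int → Int × Int
  | [], _ => (-1, -1)
  | c :: rest, a =>
    if a < c then (0, a)
    else
      let r := find_original_index_alt rest (a - c)
      if 0 ≤ r.1 then (r.1 + 1, r.2) else (-1, -1)

-- ===== PRECONDITION & SPEC =====
def Spec_find_original_index (arr : List Int) (a : Int) (out : Int × Int) : Prop := out = find_original_index_alt arr a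
instance (arr : List Int) (a : Int) (out : Int × Int) : Decidable (Spec_find_original_index arr a out) := by unfold Spec_find_original_index; infer_instance

-- ===== CLAIM =====
def Claim_equal_find_original_index : Prop := ∀ (arr : List Int) (a : Int), Dom_find_original_index arr a → Spec_find_original_index arr a (find_original_index arr a)

-- ===== LEMMAS AND PROOFS =====

-- B's recursion either fails with (-1, -1) or returns a non-negative bucket index
theorem alt_neg_eq (arr : List Int) (a : Int) :
    (find_original_index_alt arr a).1 < 0 → find_original_index_alt arr a = (-1, -1) := by
  induction arr generalizing a with
  | nil => intro _; rfl
  | cons c rest ih =>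
    intro h
    by_cases hc : a < c
    · simp [find_original_index_alt, hc] at h
    · simp only [find_original_index_alt, if_neg hc] at h ⊢
      by_cases hr : 0 ≤ (find_original_index_alt rest (a - c)).1
      · simp [hr] at h; omega
      · simp [hr]

-- A's loop state (i, s) against B's rebased recursion on (a - s)
theorem goA_eq_alt (arr : List Int) :
    ∀ (a i s : Int),
      goA a arr i s =
        (let r := find_original_index_alt arr (a - s)
         if 0 ≤ r.1 then (i + r.1, r.2) else (-1, -1)) := by
  induction arr with
  | nil => intro a i s; simp [goA, find_original_index_alt]
  | cons c rest ih =>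
    intro a i s
    by_cases hc : a < s + c
    · have hc' : a - s < c := by omega
      simp [goA, hc, find_original_index_alt, hc']
    · have hc' : ¬ (a - s < c) := by omega
      simp only [goA, if_neg hc, find_original_index_alt, if_neg hc']
      rw [ih a (i + 1) (s + c)]
      have harg : a - (s + c) = a - s - c := by ring
      rw [harg]
      by_cases h0 : 0 ≤ (find_original_index_alt rest (a - s - c)).1
      · have h1 : 0 ≤ (find_original_index_alt rest (a - s - c)).1 + 1 := by omega
        simp only [if_pos h0, if_pos h1]
        refine Prod.ext ?_ rfl
        simp; ring
      · have hr11 := alt_neg_eq rest (a - s - c) (by omega)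
        simp [hr11]

-- ===== VERDICT =====
theorem find_original_index_spec : Claim_equal_find_original_index := by
  intro arr a _
  unfold Spec_find_original_index find_original_index
  rw [goA_eq_alt arr a 0 0]
  simp only [sub_zero]
  by_cases h0 : 0 ≤ (find_original_index_alt arr a).1
  · simp [h0]
  · simp [alt_neg_eq arr a (by omega)]
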